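-- pv_equiv track=rewrite | github.com/NigeloYang/federated_learning_differential_privacy | algorithm/nowcoderH200/array/71-rotateII.py | rotateII2
-- ===== SOURCE A (Python) =====
-- from typing import List
--
-- def rotateII2(n: int, k: int) -> List[List[int]]:
--     if n == 0:
--         return []
--
--     ans = [[0] * n for i in range(n)]
--     k %= n
--     for i in range(n):
--         for j in range(n):
--             ni = (i + k) % n
--             nj = (j + k) % n
--             ans[i][j] += n * ni + nj + 1
--     return ans
-- ===== SOURCE B (Python) =====
-- def rotateII2(n, k):
--     if n == 0:
--         return []
--     k %= n
--     base = [[n * i + j + 1 for j in range(n)] for i in range(n)]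
--     return [row[k:] + row[:k] for row in base[k:] + base[:k]]
-- ===== Notes on version B (the rewrite author's own statement) =====
-- stated objective: alternative
-- what changed: Instead of filling each cell with per-cell modular index arithmetic in a nested loop, B builds the plain row-major 1..n^2 grid and produces the answer by rotating the row list and each row's columns left by k via list slicing.
import Mathlib
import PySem

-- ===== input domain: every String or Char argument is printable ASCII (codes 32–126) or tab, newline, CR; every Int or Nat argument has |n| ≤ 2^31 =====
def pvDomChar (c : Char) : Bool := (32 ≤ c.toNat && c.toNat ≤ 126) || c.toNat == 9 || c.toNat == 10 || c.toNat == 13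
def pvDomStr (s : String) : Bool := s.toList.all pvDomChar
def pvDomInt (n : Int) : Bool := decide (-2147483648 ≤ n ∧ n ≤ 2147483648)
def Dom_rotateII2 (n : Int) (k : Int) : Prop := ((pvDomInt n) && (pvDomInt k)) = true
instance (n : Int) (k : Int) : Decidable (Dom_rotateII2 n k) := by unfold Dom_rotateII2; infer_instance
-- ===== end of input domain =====

-- B replaces the per-cell modular-arithmetic fill of A by building the plain row-major
-- 1..n^2 grid and rotating rows and columns left by k via list slicing (alternative decomposition, same O(n^2) cost).


-- ===== PORT A =====
-- helper for Python's 'ans[i][j] += v' (indices here are the nonnegative loop indices)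
def pvBumpRow (r : List Int) (j : Nat) (v : Int) : List Int := r.set j (r.getD j 0 + v)
def pvBump (M : List (List Int)) (i j : Nat) (v : Int) : List (List Int) :=
  M.set i (pvBumpRow (M.getD i []) j v)

def rotateII2 (n : Int) (k : Int) : List (List Int) :=
  if n == 0 then []
  else
    -- [[0] * n for i in range(n)]  ('[0] * n' is List.replicate n.toNat 0; exact, empty for n ≤ 0)
    let ans0 := (PySem.List.pyRange 0 n 1).map (fun _ => List.replicate n.toNat (0 : Int))
    let k' := PySem.Int.mod k n
    (PySem.List.pyRange 0 n 1).foldl (fun ans i =>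
      (PySem.List.pyRange 0 n 1).foldl (fun ans j =>
        let ni := PySem.Int.mod (i + k') n
        let nj := PySem.Int.mod (j + k') n
        pvBump ans i.toNat j.toNat (n * ni + nj + 1)) ans) ans0

-- ===== PORT B =====
def rotateII2_alt (n : Int) (k : Int) : List (List Int) :=
  if n == 0 then []
  else
    let k' := PySem.Int.mod k n
    let base := (PySem.List.pyRange 0 n 1).map (fun i =>
      (PySem.List.pyRange 0 n 1).map (fun j => n * i + j + 1))
    (PySem.List.slice base (some k') none ++ PySem.List.slice base none (some k')).map
      (fun row => PySem.List.slice row (some k') none ++ PySem.List.slice row none (some k'))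

-- ===== PRECONDITION & SPEC =====
def Spec_rotateII2 (n : Int) (k : Int) (out : List (List Int)) : Prop := out = rotateII2_alt n k
instance (n : Int) (k : Int) (out : List (List Int)) : Decidable (Spec_rotateII2 n k out) := by unfold Spec_rotateII2; infer_instance

-- ===== CLAIM (what is proved, stated in full; the proofs are below) =====
def Claim_equal_rotateII2 : Prop := ∀ (n : Int) (k : Int), Dom_rotateII2 n k → Spec_rotateII2 n k (rotateII2 n k)

-- ===== LEMMAS AND PROOFS =====

-- Generic: folding 'set index i to F i (current entry i)' over range [a, m) rewrites
-- every entry at position ≥ a by F, given that the step function has that shape on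
-- accumulators of length m.
theorem pv_foldl_stepset {α : Type} (d : α) (m : Nat) (step : List α → Int → List α)
    (F : Int → α → α)
    (hstep : ∀ (xs : List α) (i : Int), xs.length = m → 0 ≤ i → i < (m : Int) →
      step xs i = xs.set i.toNat (F i (xs.getD i.toNat d))) :
    ∀ (t a : Nat) (xs : List α), m - a = t → a ≤ m → xs.length = m →
      (PySem.List.pyRange (a : Int) (m : Int) 1).foldl step xs
        = xs.mapIdx (fun j x => if a ≤ j then F (j : Int) x else x) := by
  intro t
  induction t with
  | zero =>
    intro a xs ht ha hlen
    have ham : a = m := by omega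
    rw [PySem.List.pyRange_one_eq_nil (by omega)]
    simp only [List.foldl_nil]
    apply List.ext_getElem (by simp)
    intro j h1 h2
    simp only [List.getElem_mapIdx]
    have : ¬ a ≤ j := by simp at h2; omega
    simp [this]
  | succ t ih =>
    intro a xs ht ha hlen
    have hlt : a < m := by omega
    rw [PySem.List.pyRange_one_cons (by exact_mod_cast hlt)]
    simp only [List.foldl_cons]
    rw [hstep xs (a : Int) hlen (by positivity) (by exact_mod_cast hlt)]
    have h1 : ((a : Int)).toNat = a := by simp
    rw [h1]
    have : ((a : Int) + 1) = ((a + 1 : Nat) : Int) := by push_cast; ring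
    rw [this, ih (a + 1) _ (by omega) (by omega) (by simp [hlen])]
    apply List.ext_getElem (by simp [hlen])
    intro j hj1 hj2
    simp only [List.getElem_mapIdx, List.getElem_set]
    have hjm : j < m := by simp [hlen] at hj2; omega
    by_cases hja : j = a
    · subst hja
      have : ¬ (j + 1 ≤ j) := by omega
      simp [this, List.getD_eq_getElem?_getD, List.getElem?_eq_getElem (by omega : j < xs.length)]
    · by_cases hle : a ≤ j
      · have : a + 1 ≤ j := by omega
        simp [hle, this, Ne.symm hja]
      · have : ¬ (a + 1 ≤ j) := by omega
        simp [hle, this, Ne.symm hja]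

-- The inner loop only touches row i: it collapses to a single set of that row.
theorem pv_foldl_bump_fixed_row (i : Nat) (g : Int → Int) :
    ∀ (js : List Int) (M : List (List Int)), i < M.length →
      js.foldl (fun M j => pvBump M i j.toNat (g j)) M
        = M.set i (js.foldl (fun r j => pvBumpRow r j.toNat (g j)) (M.getD i [])) := by
  intro js
  induction js with
  | nil =>
    intro M hi
    simp only [List.foldl_nil]
    apply List.ext_getElem (by simp)
    intro j h1 h2
    rw [List.getElem_set]
    split
    · next h => subst h; simp [List.getD_eq_getElem?_getD, List.getElem?_eq_getElem h1]
    · rfl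
  | cons j js ihs =>
    intro M hi
    simp only [List.foldl_cons]
    rw [pvBump, ihs _ (by simp [hi]), List.set_set]
    congr 1
    rw [List.getD_eq_getElem?_getD, List.getElem?_set_self (by simp [hi])]
    simp [List.getD_eq_getElem?_getD]

theorem pv_emod_small (a n : Int) (h : 0 < n) (h0 : 0 ≤ a) (h2 : a < 2 * n) :
    a % n = if a < n then a else a - n := by
  split
  · next hlt => exact Int.emod_eq_of_lt h0 hlt
  · next hge =>
    rw [← Int.sub_emod_right a n]
    exact Int.emod_eq_of_lt (by omega) (by omega)

theorem pv_rot_index (n : Int) (h : 0 < n) (t : Nat) (h1 : t < n.toNat) (i : Nat)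
    (hi : i < n.toNat) :
    PySem.Int.mod ((i : Int) + (t : Int)) n
      = if i < n.toNat - t then ((t + i : Nat) : Int)
        else ((i - (n.toNat - t) : Nat) : Int) := by
  rw [PySem.Int.mod_eq_emod_of_pos h, pv_emod_small _ _ h (by omega) (by omega)]
  split_ifs <;> push_cast <;> omega

-- rotating the list [f 0, …, f (n-1)] left by t turns index i into f ((i + t) mod n)
theorem pv_rotate_map {α : Type} (n : Int) (h : 0 < n) (t : Nat) (ht : t < n.toNat)
    (f : Int → α) :
    ((PySem.List.pyRange 0 n 1).map f).drop t ++ ((PySem.List.pyRange 0 n 1).map f).take t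
      = (PySem.List.pyRange 0 n 1).map (fun i => f (PySem.Int.mod (i + (t : Int)) n)) := by
  apply List.ext_getElem
  · simp [PySem.List.length_pyRange_one]; omega
  intro i h1 h2
  have him : i < n.toNat := by
    simp [PySem.List.length_pyRange_one] at h2; omega
  rw [List.getElem_map, PySem.List.getElem_pyRange_one, zero_add]
  rw [List.getElem_append]
  have hmod := pv_rot_index n h t ht i him
  split
  · next hlt =>
    have hlt' : i < n.toNat - t := by
      simpa [PySem.List.length_pyRange_one] using hlt
    rw [List.getElem_drop, List.getElem_map, PySem.List.getElem_pyRange_one, zero_add,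
      hmod, if_pos hlt']
  · next hge =>
    have hge' : ¬ i < n.toNat - t := by
      simpa [PySem.List.length_pyRange_one] using hge
    rw [List.getElem_take, List.getElem_map, PySem.List.getElem_pyRange_one, zero_add,
      hmod, if_neg hge']
    congr 1
    simp [PySem.List.length_pyRange_one]

theorem pvA_char (n k : Int) (h : 0 < n) :
    rotateII2 n k = (PySem.List.pyRange 0 n 1).map (fun i =>
      (PySem.List.pyRange 0 n 1).map (fun j =>
        n * PySem.Int.mod (i + PySem.Int.mod k n) n
          + PySem.Int.mod (j + PySem.Int.mod k n) n + 1)) := by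
  have hne : (n == 0) = false := by simp; omega
  have hnn : ((n.toNat : Nat) : Int) = n := Int.toNat_of_nonneg h.le
  simp only [rotateII2, hne, Bool.false_eq_true, if_false]
  have key := pv_foldl_stepset ([] : List Int) n.toNat
      (fun ans i => (PySem.List.pyRange 0 n 1).foldl (fun ans j =>
        pvBump ans i.toNat j.toNat
          (n * PySem.Int.mod (i + PySem.Int.mod k n) n
            + PySem.Int.mod (j + PySem.Int.mod k n) n + 1)) ans)
      (fun (i : Int) (r : List Int) => (PySem.List.pyRange 0 n 1).foldl (fun r j =>
        pvBumpRow r j.toNat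
          (n * PySem.Int.mod (i + PySem.Int.mod k n) n
            + PySem.Int.mod (j + PySem.Int.mod k n) n + 1)) r)
      (by intro xs i hl h0 hi
          exact pv_foldl_bump_fixed_row i.toNat _ _ xs (by omega))
      n.toNat 0
      ((PySem.List.pyRange 0 n 1).map fun _ => List.replicate n.toNat (0 : Int))
      (by omega) (Nat.zero_le _) (by simp [PySem.List.length_pyRange_one])
  simp only [Nat.cast_zero, hnn, Nat.zero_le, if_true] at key
  rw [key]
  apply List.ext_getElem (by simp [PySem.List.length_pyRange_one])
  intro i hi1 hi2
  simp only [List.getElem_mapIdx, List.getElem_map, PySem.List.getElem_pyRange_one, zero_add]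
  have key2 := pv_foldl_stepset (0 : Int) n.toNat
      (fun (r : List Int) (j : Int) => pvBumpRow r j.toNat
        (n * PySem.Int.mod ((i : Int) + PySem.Int.mod k n) n
          + PySem.Int.mod (j + PySem.Int.mod k n) n + 1))
      (fun (j : Int) (x : Int) =>
        x + (n * PySem.Int.mod ((i : Int) + PySem.Int.mod k n) n
          + PySem.Int.mod (j + PySem.Int.mod k n) n + 1))
      (by intro xs j hl h0 hj; rfl) n.toNat 0 (List.replicate n.toNat (0 : Int))
      (by omega) (Nat.zero_le _) (by simp)
  simp only [Nat.cast_zero, hnn, Nat.zero_le, if_true] at key2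
  rw [key2]
  apply List.ext_getElem (by simp [PySem.List.length_pyRange_one])
  intro j hj1 hj2
  simp [PySem.List.getElem_pyRange_one]

theorem pvB_char (n k : Int) (h : 0 < n) :
    rotateII2_alt n k = (PySem.List.pyRange 0 n 1).map (fun i =>
      (PySem.List.pyRange 0 n 1).map (fun j =>
        n * PySem.Int.mod (i + PySem.Int.mod k n) n
          + PySem.Int.mod (j + PySem.Int.mod k n) n + 1)) := by
  have hne : (n == 0) = false := by simp; omega
  have h0 : 0 ≤ PySem.Int.mod k n := PySem.Int.mod_nonneg k h
  have h1 : PySem.Int.mod k n < n := PySem.Int.mod_lt k h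
  have htc : (((PySem.Int.mod k n).toNat : Nat) : Int) = PySem.Int.mod k n :=
    Int.toNat_of_nonneg h0
  have htm : (PySem.Int.mod k n).toNat < n.toNat := by omega
  simp only [rotateII2_alt, hne, Bool.false_eq_true, if_false,
    PySem.List.slice_from _ h0, PySem.List.slice_to _ h0]
  rw [pv_rotate_map n h _ htm
    (fun i => (PySem.List.pyRange 0 n 1).map (fun j => n * i + j + 1)), List.map_map]
  apply List.map_congr_left
  intro i _
  simp only [Function.comp]
  rw [pv_rotate_map n h _ htm
    (fun j => n * PySem.Int.mod (i + ((PySem.Int.mod k n).toNat : Int)) n + j + 1)]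
  rw [htc]

-- ===== VERDICT (by name: the statement is the Claim_ definition above) =====
theorem rotateII2_spec : Claim_equal_rotateII2 := by
  intro n k _
  unfold Spec_rotateII2
  rcases lt_trichotomy n 0 with h | h | h
  · have hne : (n == 0) = false := by simp; omega
    simp [rotateII2, rotateII2_alt, hne, PySem.List.pyRange_one_eq_nil h.le,
      PySem.List.slice]
  · subst h
    simp [rotateII2, rotateII2_alt]
  · rw [pvA_char n k h, pvB_char n k h]
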